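-- pv_equiv track=rewrite | github.com/NvAlekz/ChansEgg | app.py | _bucketize_info_moves
-- ===== SOURCE A (Python) =====
-- from typing import Dict, List, Optional, Tuple
--
-- def _bucketize_info_moves(rows: List[dict]) -> Dict[str, List[dict]]:
--     buckets: Dict[str, List[dict]] = {"level": [], "egg": [], "tm": [], "hm": []}
--     for r in rows:
--         bucket = (r.get("learn_bucket", "") or "").strip().lower()
--         if bucket in buckets:
--             buckets[bucket].append(r)
--     buckets["level"].sort(key=lambda r: (int(r.get("level", 0) or 0), r.get("name", "")))
--     buckets["egg"].sort(key=lambda r: r.get("name", ""))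
--     buckets["tm"].sort(key=lambda r: r.get("name", ""))
--     buckets["hm"].sort(key=lambda r: r.get("name", ""))
--     return buckets
-- ===== SOURCE B (Python) =====
-- from typing import Dict, List
--
--
-- def _bucketize_info_moves(rows: List[dict]) -> Dict[str, List[dict]]:
--     # One global stable sort by name; egg/tm/hm buckets are then plain filters of it
--     # (already name-sorted).  The level bucket needs its own (level, name) key anyway,
--     # so it is built by a single keyed sort over the unsorted rows.
--     def bucket_of(r: dict) -> str:
--         return (r.get("learn_bucket", "") or "").strip().lower()
--
--     by_name = sorted(rows, key=lambda r: r.get("name", ""))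
--     return {
--         "level": sorted(
--             (r for r in rows if bucket_of(r) == "level"),
--             key=lambda r: (int(r.get("level", 0) or 0), r.get("name", "")),
--         ),
--         "egg": [r for r in by_name if bucket_of(r) == "egg"],
--         "tm": [r for r in by_name if bucket_of(r) == "tm"],
--         "hm": [r for r in by_name if bucket_of(r) == "hm"],
--     }
-- ===== Notes on version B (the rewrite author's own statement) =====
-- stated objective: alternative
-- what changed: Replaces the mutating dict-dispatch loop followed by four per-bucket sorts with one global stable sort by name whose filters yield the egg/tm/hm buckets (stability makes them already name-sorted) plus a single (level,name)-keyed sort for the level bucket, returned as a pure dict literal.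
import Mathlib
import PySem

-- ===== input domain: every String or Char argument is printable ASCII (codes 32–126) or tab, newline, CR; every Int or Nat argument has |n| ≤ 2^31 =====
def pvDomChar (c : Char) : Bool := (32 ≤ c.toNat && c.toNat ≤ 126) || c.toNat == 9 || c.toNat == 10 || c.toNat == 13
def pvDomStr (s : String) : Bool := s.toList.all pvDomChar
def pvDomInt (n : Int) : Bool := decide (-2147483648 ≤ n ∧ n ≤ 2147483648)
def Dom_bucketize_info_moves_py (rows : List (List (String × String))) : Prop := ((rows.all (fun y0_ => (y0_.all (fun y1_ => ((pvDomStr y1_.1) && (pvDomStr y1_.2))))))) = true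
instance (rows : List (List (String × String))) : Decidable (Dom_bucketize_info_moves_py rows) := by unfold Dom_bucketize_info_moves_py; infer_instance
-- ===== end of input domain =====

-- B replaces A's dict-dispatch-then-sort-each-bucket with one global stable sort by name
-- plus pure filters (egg/tm/hm) and a single keyed sort for the level bucket (alternative decomposition).


-- ===== PORT A =====
-- shared helpers: r.get(k, d) on a row (first match), the normalised learn_bucket,
-- and the two sort keys.  `(… or "")` is the identity here (the falsy case is already "").
def rowGet (r : List (String × String)) (k d : String) : String :=
  PySem.Dict.getD ⟨r⟩ k d

def normBucket (r : List (String × String)) : String :=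
  PySem.Str.lower (PySem.Str.strip (rowGet r "learn_bucket" ""))

def nameKey (r : List (String × String)) : String :=
  rowGet r "name" ""

-- int(r.get("level", 0) or 0); the `none` (ValueError) case is excluded by Pre_, getD 0 there.
def levelKey (r : List (String × String)) : Int :=
  match (PySem.Dict.get? (⟨r⟩ : PySem.Dict String String) "level") with
  | none => 0
  | some s => if s = "" then 0 else (PySem.Int.ofStr? s).getD 0

def bucketize_info_moves_py (rows : List (List (String × String))) : List (String × List (List (String × String))) :=
  let buckets : PySem.Dict String (List (List (String × String))) :=
    ((((PySem.Dict.empty).insert "level" []).insert "egg" []).insert "tm" []).insert "hm" []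
  let buckets := rows.foldl (fun bs r =>
    let bucket := normBucket r
    if bs.contains bucket then PySem.Dict.modify bs bucket [] (fun l => l ++ [r]) else bs) buckets
  let buckets := PySem.Dict.modify buckets "level" [] (fun l => PySem.List.sorted2 l levelKey nameKey)
  let buckets := PySem.Dict.modify buckets "egg" [] (fun l => PySem.List.sorted l nameKey)
  let buckets := PySem.Dict.modify buckets "tm" [] (fun l => PySem.List.sorted l nameKey)
  let buckets := PySem.Dict.modify buckets "hm" [] (fun l => PySem.List.sorted l nameKey)
  buckets.items

-- ===== PORT B =====
def bucketize_info_moves_py_alt (rows : List (List (String × String))) : List (String × List (List (String × String))) :=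
  let byName := PySem.List.sorted rows nameKey
  [("level", PySem.List.sorted2 (rows.filter (fun r => normBucket r == "level")) levelKey nameKey),
   ("egg", byName.filter (fun r => normBucket r == "egg")),
   ("tm", byName.filter (fun r => normBucket r == "tm")),
   ("hm", byName.filter (fun r => normBucket r == "hm"))]

-- ===== PRECONDITION & SPEC =====
-- Pre_ excludes exactly the inputs where Python raises ValueError: a row dispatched to the
-- "level" bucket whose "level" value is a non-empty string that int() cannot parse.
def Pre_bucketize_info_moves_py (rows : List (List (String × String))) : Prop :=
  ∀ r ∈ rows, normBucket r = "level" →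
    ∀ s, PySem.Dict.get? (⟨r⟩ : PySem.Dict String String) "level" = some s →
      s ≠ "" → (PySem.Int.ofStr? s).isSome
instance (rows : List (List (String × String))) : Decidable (Pre_bucketize_info_moves_py rows) := by
  unfold Pre_bucketize_info_moves_py; infer_instance

def pvWitness_bucketize_info_moves_py : (List (List (String × String))) :=
  [[("learn_bucket", "level"), ("level", "5"), ("name", "Pound")],
   [("learn_bucket", "egg"), ("name", "Charm")]]

def Spec_bucketize_info_moves_py (rows : List (List (String × String))) (out : List (String × List (List (String × String)))) : Prop := out = bucketize_info_moves_py_alt rows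
instance (rows : List (List (String × String))) (out : List (String × List (List (String × String)))) : Decidable (Spec_bucketize_info_moves_py rows out) := by unfold Spec_bucketize_info_moves_py; infer_instance

-- ===== CLAIM (what is proved, stated in full; the proofs are below) =====
def Claim_equal_bucketize_info_moves_py : Prop := ∀ (rows : List (List (String × String))), Dom_bucketize_info_moves_py rows → Pre_bucketize_info_moves_py rows → Spec_bucketize_info_moves_py rows (bucketize_info_moves_py rows)

-- ===== LEMMAS AND PROOFS =====

-- insertBy puts x first when x's key is below every element's key
theorem insertBy_of_lt_all {α κ : Type} [LinearOrder κ] (key : α → κ) (x : α) (ys : List α)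
    (h : ∀ z ∈ ys, key x < key z) :
    PySem.List.insertBy (fun a c => decide (key a < key c)) x ys = x :: ys := by
  cases ys with
  | nil => rfl
  | cons y t => simp [PySem.List.insertBy, h y (by simp)]

-- filtering commutes with inserting into a key-sorted list
theorem filter_insertBy {α κ : Type} [LinearOrder κ] (key : α → κ) (p : α → Bool) (x : α)
    (ys : List α) (h : ys.Pairwise (fun a c => key a ≤ key c)) :
    (PySem.List.insertBy (fun a c => decide (key a < key c)) x ys).filter p
      = if p x then PySem.List.insertBy (fun a c => decide (key a < key c)) x (ys.filter p)
        else ys.filter p := by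
  induction ys with
  | nil => by_cases hx : p x <;> simp [PySem.List.insertBy, hx]
  | cons y t ih =>
    rcases List.pairwise_cons.mp h with ⟨h1, h2⟩
    by_cases hlt : key x < key y
    · have hall : ∀ z ∈ (y :: t).filter p, key x < key z := by
        intro z hz
        have hz' := List.mem_of_mem_filter hz
        rcases List.mem_cons.mp hz' with rfl | hzt
        · exact hlt
        · exact lt_of_lt_of_le hlt (h1 z hzt)
      rw [insertBy_of_lt_all key x ((y :: t).filter p) hall]
      by_cases hx : p x <;>
        simp [PySem.List.insertBy, hlt, hx, List.filter_cons]
    · have ihe := ih h2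
      by_cases hx : p x <;> by_cases hy : p y <;>
        simp [PySem.List.insertBy, hlt, hx, hy, ihe]

-- sorted over a snoc is an insertBy into sorted
theorem sorted_snoc {α κ : Type} [LinearOrder κ] (key : α → κ) (xs : List α) (x : α) :
    PySem.List.sorted (xs ++ [x]) key false
      = PySem.List.insertBy (fun a c => decide (key a < key c)) x (PySem.List.sorted xs key false) := by
  simp [PySem.List.sorted, List.foldl_append]

-- MAIN ORDER LEMMA: filtering a stably name-sorted list = stably sorting the filtered list
theorem filter_sorted {α κ : Type} [LinearOrder κ] (key : α → κ) (p : α → Bool) (xs : List α) :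
    (PySem.List.sorted xs key false).filter p = PySem.List.sorted (xs.filter p) key false := by
  induction xs using List.reverseRecOn with
  | nil => rfl
  | append_singleton xs x ih =>
    rw [sorted_snoc, filter_insertBy key p x _ (PySem.List.sorted_pairwise xs key),
        List.filter_append]
    by_cases hx : p x
    · simp only [hx, if_true, List.filter_cons, List.filter_nil, ih]
      rw [sorted_snoc]
    · simp [hx, ih]

-- one step of A's dispatch loop on the concrete four-key dict
theorem stepA_items (a b c d : List (List (String × String))) (r : List (String × String)) :
    (let bucket := normBucket r
     if PySem.Dict.contains (⟨[("level", a), ("egg", b), ("tm", c), ("hm", d)]⟩ : PySem.Dict String (List (List (String × String)))) bucket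
     then PySem.Dict.modify (⟨[("level", a), ("egg", b), ("tm", c), ("hm", d)]⟩ : PySem.Dict String (List (List (String × String)))) bucket [] (fun l => l ++ [r])
     else ⟨[("level", a), ("egg", b), ("tm", c), ("hm", d)]⟩)
    = (⟨[("level", if normBucket r == "level" then a ++ [r] else a),
         ("egg", if normBucket r == "egg" then b ++ [r] else b),
         ("tm", if normBucket r == "tm" then c ++ [r] else c),
         ("hm", if normBucket r == "hm" then d ++ [r] else d)]⟩ : PySem.Dict String (List (List (String × String)))) := by
  by_cases h1 : normBucket r = "level"
  · simp [h1, PySem.Dict.contains, PySem.Dict.modify, PySem.Dict.insert, PySem.Dict.getD, PySem.Dict.get?]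
  · by_cases h2 : normBucket r = "egg"
    · simp [h2, PySem.Dict.contains, PySem.Dict.modify, PySem.Dict.insert, PySem.Dict.getD, PySem.Dict.get?]
    · by_cases h3 : normBucket r = "tm"
      · simp [h3, PySem.Dict.contains, PySem.Dict.modify, PySem.Dict.insert, PySem.Dict.getD, PySem.Dict.get?]
      · by_cases h4 : normBucket r = "hm"
        · simp [h4, PySem.Dict.contains, PySem.Dict.modify, PySem.Dict.insert, PySem.Dict.getD, PySem.Dict.get?]
        · simp only [PySem.Dict.contains]
          simp [h1, h2, h3, h4]
          rintro (h | h | h | h) <;> simp_all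

-- A's dispatch loop appends each bucket's filter
theorem foldA_items (rows : List (List (String × String))) (a b c d : List (List (String × String))) :
    rows.foldl (fun bs r =>
        let bucket := normBucket r
        if bs.contains bucket then PySem.Dict.modify bs bucket [] (fun l => l ++ [r]) else bs)
      (⟨[("level", a), ("egg", b), ("tm", c), ("hm", d)]⟩ : PySem.Dict String (List (List (String × String))))
    = ⟨[("level", a ++ rows.filter (fun r => normBucket r == "level")),
       ("egg", b ++ rows.filter (fun r => normBucket r == "egg")),
       ("tm", c ++ rows.filter (fun r => normBucket r == "tm")),
       ("hm", d ++ rows.filter (fun r => normBucket r == "hm"))]⟩ := by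
  induction rows generalizing a b c d with
  | nil => simp
  | cons r t ih =>
    rw [List.foldl_cons, stepA_items a b c d r, ih]
    by_cases h1 : normBucket r = "level" <;> by_cases h2 : normBucket r = "egg" <;>
      by_cases h3 : normBucket r = "tm" <;> by_cases h4 : normBucket r = "hm" <;>
      simp [h1, h2, h3, h4]

-- ===== VERDICT (by name: the statement is the Claim_ definition above) =====
theorem bucketize_info_moves_py_spec : Claim_equal_bucketize_info_moves_py := by
  intro rows _ _
  unfold Spec_bucketize_info_moves_py bucketize_info_moves_py bucketize_info_moves_py_alt
  have hinit : ((((PySem.Dict.empty).insert "level" ([] : List (List (String × String)))).insert "egg" []).insert "tm" []).insert "hm" []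
      = (⟨[("level", []), ("egg", []), ("tm", []), ("hm", [])]⟩ : PySem.Dict String (List (List (String × String)))) := rfl
  simp only [hinit, foldA_items, List.nil_append]
  simp [PySem.Dict.modify, PySem.Dict.insert, PySem.Dict.getD, PySem.Dict.get?, PySem.Dict.contains,
        filter_sorted nameKey]
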